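-- pv_equiv track=rewrite | github.com/Coki628/kyopro_submissions | CodeForces/1248d.py | check
-- ===== SOURCE A (Python) =====
-- from collections import Counter
--
-- def check(S):
--     cnt = 0
--     C = Counter()
--     for s in S:
--         if s == '(':
--             cnt += 1
--         else:
--             cnt -= 1
--         C[cnt] += 1
--     C = sorted(C.items())
--     return C[0][1]
-- ===== SOURCE B (Python) =====
-- def check(S):
--     cnt = 0
--     mn = None
--     res = 0
--     for s in S:
--         cnt += 1 if s == '(' else -1
--         if mn is None or cnt < mn:
--             mn = cnt
--             res = 1
--         elif cnt == mn:
--             res += 1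
--     return res
-- ===== Notes on version B (the rewrite author's own statement) =====
-- stated objective: faster
-- what changed: Replaces the Counter plus sorted(items) pass (whose first entry is the minimum prefix sum with its multiplicity) by a single pass that tracks the running minimum prefix sum and how often it occurs.
import Mathlib
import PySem

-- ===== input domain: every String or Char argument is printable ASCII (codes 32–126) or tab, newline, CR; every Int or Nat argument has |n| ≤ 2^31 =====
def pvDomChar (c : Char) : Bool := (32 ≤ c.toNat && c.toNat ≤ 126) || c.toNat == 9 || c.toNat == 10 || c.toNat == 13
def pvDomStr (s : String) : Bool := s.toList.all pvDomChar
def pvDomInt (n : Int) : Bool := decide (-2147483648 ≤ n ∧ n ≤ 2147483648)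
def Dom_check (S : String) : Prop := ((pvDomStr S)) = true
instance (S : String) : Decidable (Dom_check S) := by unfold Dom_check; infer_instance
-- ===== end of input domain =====

-- B replaces A's Counter + sorted(items) pass by a single pass tracking the minimum prefix
-- sum and its occurrence count (asymptotically faster); no argument is mutated.

-- ===== PORT A =====
def check (S : String) : Int :=
  let st := S.toList.foldl
    (fun (p : Int × PySem.Dict Int Int) s =>
      let cnt := if s = '(' then p.1 + 1 else p.1 - 1
      (cnt, p.2.modify cnt 0 (· + 1)))
    (0, PySem.Dict.empty)
  let C := PySem.List.sorted2 st.2.items (fun q => q.1) (fun q => q.2)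
  match PySem.List.pyGet? C 0 with
  | some q => q.2
  | none => 0   -- unreachable under Pre_check (Python: IndexError on the empty string)

-- ===== PORT B =====
def check_alt (S : String) : Int :=
  let st := S.toList.foldl
    (fun (p : Int × Option Int × Int) s =>
      let cnt := p.1 + (if s = '(' then 1 else -1)
      match p.2.1 with
      | none => (cnt, some cnt, 1)
      | some m =>
        if cnt < m then (cnt, some cnt, 1)
        else if cnt = m then (cnt, some m, p.2.2 + 1)
        else (cnt, some m, p.2.2))
    (0, none, 0)
  st.2.2

-- ===== PRECONDITION & SPEC =====
-- Pre_ excludes only the empty string, on which A raises IndexError (C[0] of an empty list).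
def Pre_check (S : String) : Prop := S.toList ≠ []
instance (S : String) : Decidable (Pre_check S) := by unfold Pre_check; infer_instance

def pvWitness_check : String := "(()"

def Spec_check (S : String) (out : Int) : Prop := out = check_alt S
instance (S : String) (out : Int) : Decidable (Spec_check S out) := by unfold Spec_check; infer_instance

-- ===== CLAIM (what is proved, stated in full; the proofs are below) =====
def Claim_equal_check : Prop := ∀ (S : String), Dom_check S → Pre_check S → Spec_check S (check S)

-- ===== LEMMAS AND PROOFS =====

-- prefix sums of the parenthesis walk, starting from c
def pfx (c : Int) : List Char → List Int
  | [] => []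
  | s :: t => (if s = '(' then c + 1 else c - 1) :: pfx (if s = '(' then c + 1 else c - 1) t

-- final running sum (first loop component), kept abstract
def pfxEnd (c : Int) : List Char → Int
  | [] => c
  | s :: t => pfxEnd (if s = '(' then c + 1 else c - 1) t

theorem loopA (l : List Char) : ∀ (c : Int) (D : PySem.Dict Int Int),
    l.foldl (fun (p : Int × PySem.Dict Int Int) s =>
        let cnt := if s = '(' then p.1 + 1 else p.1 - 1
        (cnt, p.2.modify cnt 0 (· + 1))) (c, D)
      = (pfxEnd c l, (pfx c l).foldl (fun d x => d.modify x 0 (· + 1)) D) := by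
  induction l with
  | nil => intro c D; simp [pfx, pfxEnd]
  | cons s t ih => intro c D; simp only [List.foldl_cons, pfx, pfxEnd, ih]

theorem loopB (l : List Char) : ∀ (c m k : Int),
    l.foldl (fun (p : Int × Option Int × Int) s =>
        let cnt := p.1 + (if s = '(' then 1 else -1)
        match p.2.1 with
        | none => (cnt, some cnt, 1)
        | some m =>
          if cnt < m then (cnt, some cnt, 1)
          else if cnt = m then (cnt, some m, p.2.2 + 1)
          else (cnt, some m, p.2.2)) (c, some m, k)
      = (pfxEnd c l, some ((pfx c l).foldl min m),
         (if (pfx c l).foldl min m = m then k else 0) + ((pfx c l).count ((pfx c l).foldl min m) : Int)) := by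
  induction l with
  | nil => intro c m k; simp [pfx, pfxEnd]
  | cons s t ih =>
    intro c m k
    have hδ : c + (if s = '(' then (1:Int) else -1) = (if s = '(' then c + 1 else c - 1) := by
      split <;> ring
    set c' : Int := if s = '(' then c + 1 else c - 1 with hc'
    have hpfx : pfx c (s :: t) = c' :: pfx c' t := by rw [pfx]
    have hend : pfxEnd c (s :: t) = pfxEnd c' t := by rw [pfxEnd]
    rcases lt_trichotomy c' m with h | h | h
    · have hmin : min m c' = c' := by omega
      have hle := (PySem.List.foldl_min_le (pfx c' t) c').1
      simp only [List.foldl_cons, hδ, if_pos h, ih, hpfx, hend]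
      rw [hmin]
      refine Prod.ext rfl (Prod.ext rfl ?_)
      have hne : List.foldl min c' (pfx c' t) ≠ m := by omega
      rw [if_neg hne, List.count_cons]
      simp only [beq_iff_eq]
      split_ifs with h1 h2 h2 <;> push_cast <;> omega
    · have hmin : min m c' = m := by omega
      simp only [List.foldl_cons, hδ, if_neg (by omega : ¬ c' < m), if_pos h, ih, hpfx, hend]
      rw [hmin]
      refine Prod.ext rfl (Prod.ext rfl ?_)
      rw [List.count_cons]
      simp only [beq_iff_eq]
      by_cases hM : List.foldl min m (pfx c' t) = m
      · rw [if_pos hM, if_pos hM, if_pos (by omega : c' = List.foldl min m (pfx c' t))]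
        push_cast; omega
      · rw [if_neg hM, if_neg hM, if_neg (by omega : ¬ c' = List.foldl min m (pfx c' t))]
        push_cast; omega
    · have hmin : min m c' = m := by omega
      have hle := (PySem.List.foldl_min_le (pfx c' t) m).1
      simp only [List.foldl_cons, hδ, if_neg (by omega : ¬ c' < m), if_neg (by omega : ¬ c' = m), ih, hpfx, hend]
      rw [hmin]
      refine Prod.ext rfl (Prod.ext rfl ?_)
      rw [List.count_cons]
      simp only [beq_iff_eq]
      rw [if_neg (by omega : ¬ c' = List.foldl min m (pfx c' t))]
      push_cast; omega

theorem insertBy_congr {α : Type} (f g : α → α → Bool) (x : α) :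
    ∀ (ys : List α), (∀ y ∈ ys, f x y = g x y) →
      PySem.List.insertBy f x ys = PySem.List.insertBy g x ys := by
  intro ys
  induction ys with
  | nil => intro _; rfl
  | cons y t ih =>
    intro h
    simp only [PySem.List.insertBy, h y (by simp)]
    split
    · rfl
    · simp only [List.cons.injEq, true_and]
      exact ih (fun z hz => h z (by simp [hz]))

theorem foldl_insertBy_congr {α : Type} (f g : α → α → Bool) :
    ∀ (xs acc : List α), (∀ a b, (a ∈ xs ∨ a ∈ acc) → (b ∈ xs ∨ b ∈ acc) → f a b = g a b) →
      xs.foldl (fun acc x => PySem.List.insertBy f x acc) acc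
        = xs.foldl (fun acc x => PySem.List.insertBy g x acc) acc := by
  intro xs
  induction xs with
  | nil => intro _ _; rfl
  | cons x t ih =>
    intro acc h
    simp only [List.foldl_cons]
    rw [insertBy_congr f g x acc (fun y hy => h x y (Or.inl (by simp)) (Or.inr hy))]
    apply ih
    intro a b ha hb
    apply h a b
    · rcases ha with ha | ha
      · exact Or.inl (List.mem_cons_of_mem x ha)
      · rcases (PySem.List.mem_insertBy g x a acc).mp ha with h' | h'
        · exact Or.inl (h' ▸ List.mem_cons_self)
        · exact Or.inr h'
    · rcases hb with hb | hb
      · exact Or.inl (List.mem_cons_of_mem x hb)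
      · rcases (PySem.List.mem_insertBy g x b acc).mp hb with h' | h'
        · exact Or.inl (h' ▸ List.mem_cons_self)
        · exact Or.inr h'

theorem sorted2_eq_sorted_fst (xs : List (Int × Int))
    (hinj : ∀ a ∈ xs, ∀ b ∈ xs, a.1 = b.1 → a = b) :
    PySem.List.sorted2 xs (fun q => q.1) (fun q => q.2)
      = PySem.List.sorted xs (fun q => q.1) := by
  rw [PySem.List.sorted_eq_foldl_insertBy]
  show xs.foldl (fun acc x => PySem.List.insertBy _ x acc) [] = _
  apply foldl_insertBy_congr
  intro a b ha hb
  simp only [or_false, List.mem_nil_iff] at ha hb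
  rcases lt_trichotomy a.1 b.1 with h | h | h
  · simp [h]
  · have : a = b := hinj a ha b hb h
    subst this
    simp
  · simp [h, not_lt_of_gt h]

theorem check_eq_alt (S : String) (h : S.toList ≠ []) : check S = check_alt S := by
  obtain ⟨s, t, hst⟩ : ∃ s t, S.toList = s :: t := by
    cases hS : S.toList with
    | nil => exact absurd hS h
    | cons a b => exact ⟨a, b, rfl⟩
  set c1 : Int := if s = '(' then (0:Int) + 1 else (0:Int) - 1 with hc1
  set l : List Int := pfx c1 t with hl
  set M : Int := l.foldl min c1 with hM
  have hL : pfx 0 (s :: t) = c1 :: l := by rw [pfx]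
  -- B's value
  have hB : check_alt S = ((c1 :: l).count M : Int) := by
    unfold check_alt
    rw [hst, List.foldl_cons]
    have hstep : ((0:Int) + (if s = '(' then (1:Int) else -1)) = c1 := by
      rw [hc1]; split <;> ring
    simp only [hstep]
    rw [loopB t c1 c1 1]
    simp only [← hl, ← hM, List.count_cons, beq_iff_eq]
    split_ifs with h1 h2 h2 <;> push_cast <;> omega
  -- the minimum M is in the list and below every element
  have hMmem : M ∈ c1 :: l := by
    rcases PySem.List.foldl_min_mem l c1 with h' | h'
    · rw [hM, h']; simp
    · rw [hM]; simp [h']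
  have hMle : ∀ y ∈ c1 :: l, M ≤ y := by
    intro y hy
    rcases List.mem_cons.mp hy with rfl | hy'
    · exact (PySem.List.foldl_min_le l c1).1
    · exact (PySem.List.foldl_min_le l c1).2 y hy'
  -- A's value
  unfold check
  rw [hst, loopA (s :: t) 0 PySem.Dict.empty, hL]
  have hcnt : (c1 :: l).foldl (fun d x => d.modify x 0 (· + 1)) PySem.Dict.empty
      = PySem.Dict.counter (c1 :: l) := (PySem.Dict.counter_eq_foldl (c1 :: l)).symm
  simp only [hcnt, PySem.Dict.items_counter]
  set items : List (Int × Int) :=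
    (PySem.Set.ofList (c1 :: l)).map (fun k => (k, ((c1 :: l).count k : Int))) with hitems
  have hinj : ∀ a ∈ items, ∀ b ∈ items, a.1 = b.1 → a = b := by
    intro a ha b hb hab
    rw [hitems, List.mem_map] at ha hb
    obtain ⟨ka, _, rfl⟩ := ha
    obtain ⟨kb, _, rfl⟩ := hb
    simp only at hab
    subst hab; rfl
  rw [sorted2_eq_sorted_fst items hinj]
  have hne : PySem.List.sorted items (fun q => q.1) ≠ [] := by
    rw [Ne, PySem.List.sorted_eq_nil_iff, hitems]
    simp only [List.map_eq_nil_iff]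
    intro hempty
    have : c1 ∈ PySem.Set.ofList (c1 :: l) := (PySem.Set.mem_ofList _ _).mpr (by simp)
    rw [hempty] at this
    simp at this
  obtain ⟨h0, ct, hC⟩ : ∃ h0 ct, PySem.List.sorted items (fun q => q.1) = h0 :: ct := by
    cases hC : PySem.List.sorted items (fun q => q.1) with
    | nil => exact absurd hC hne
    | cons a b => exact ⟨a, b, rfl⟩
  rw [hC]
  have hget : PySem.List.pyGet? (h0 :: ct) 0 = some h0 := by
    simp [PySem.List.pyGet?, PySem.List.pyIdx?]
  rw [hget]
  -- h0 is the item of the minimum key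
  have hmem : h0 ∈ items := by
    have : h0 ∈ PySem.List.sorted items (fun q => q.1) := by rw [hC]; simp
    exact (PySem.List.mem_sorted items _ false h0).mp this
  obtain ⟨k0, hk0, hh0⟩ := List.mem_map.mp hmem
  have hk0L : k0 ∈ c1 :: l := (PySem.Set.mem_ofList _ _).mp hk0
  have hMitem : (M, ((c1 :: l).count M : Int)) ∈ items := by
    rw [hitems, List.mem_map]
    exact ⟨M, (PySem.Set.mem_ofList _ _).mpr hMmem, rfl⟩
  have hle1 : h0.1 ≤ M := PySem.List.key_head_sorted_le items (fun q => q.1) hC _ hMitem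
  have hle2 : M ≤ h0.1 := by rw [← hh0]; exact hMle k0 hk0L
  have hkey : h0.1 = M := le_antisymm hle1 hle2
  have hk0M : k0 = M := by rw [← hh0] at hkey; exact hkey
  rw [← hh0, hk0M]
  exact hB.symm

-- ===== VERDICT (by name: the statement is the Claim_ definition above) =====
theorem check_spec : Claim_equal_check := by
  intro S _ hP
  unfold Spec_check
  exact check_eq_alt S hP
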